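-- pv_equiv track=rewrite | github.com/mraesthetic/math-bop | old/games/1_0_gunslingers/redistribute_br0_scatters_v2.py | apply_scatter_redistribution
-- ===== SOURCE A (Python) =====
-- def apply_scatter_redistribution(rows, placements):
--     """Apply scatter placements to rows"""
--     new_rows = [row.copy() for row in rows]
--
--     # Remove all current scatters
--     for row in new_rows:
--         for reel_idx in range(5):
--             if row[reel_idx] == 'S':
--                 # Replace with L1 (common low symbol)
--                 row[reel_idx] = 'L1'
--
--     # Place new scatters
--     for row_idx, reel_idx in placements:
--         if 0 <= row_idx < len(new_rows) and 0 <= reel_idx < 5: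
--             new_rows[row_idx][reel_idx] = 'S'
--
--     return new_rows
-- ===== SOURCE B (Python) =====
-- def apply_scatter_redistribution(rows, placements):
--     """Apply scatter placements to rows (single pass over the grid)"""
--     placed = {(r, c) for r, c in placements}
--     new_rows = []
--     for row_idx, row in enumerate(rows):
--         new_row = row.copy()
--         for c in range(5):
--             if (row_idx, c) in placed:
--                 new_row[c] = 'S'
--             elif new_row[c] == 'S':
--                 new_row[c] = 'L1'
--         new_rows.append(new_row)
--     return new_rows
-- ===== Notes on version B (the rewrite author's own statement) =====
-- stated objective: alternative
-- what changed: Replaces A's two sequential grid passes (clear all scatters, then a separate loop applying bounds-checked placements) with a placement set built once and a single index-driven pass that decides each of the first five cells of each row directly; the explicit bounds checks disappear because iterating existing rows and columns 0..4 makes out-of-range placements simply never match.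
import Mathlib
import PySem

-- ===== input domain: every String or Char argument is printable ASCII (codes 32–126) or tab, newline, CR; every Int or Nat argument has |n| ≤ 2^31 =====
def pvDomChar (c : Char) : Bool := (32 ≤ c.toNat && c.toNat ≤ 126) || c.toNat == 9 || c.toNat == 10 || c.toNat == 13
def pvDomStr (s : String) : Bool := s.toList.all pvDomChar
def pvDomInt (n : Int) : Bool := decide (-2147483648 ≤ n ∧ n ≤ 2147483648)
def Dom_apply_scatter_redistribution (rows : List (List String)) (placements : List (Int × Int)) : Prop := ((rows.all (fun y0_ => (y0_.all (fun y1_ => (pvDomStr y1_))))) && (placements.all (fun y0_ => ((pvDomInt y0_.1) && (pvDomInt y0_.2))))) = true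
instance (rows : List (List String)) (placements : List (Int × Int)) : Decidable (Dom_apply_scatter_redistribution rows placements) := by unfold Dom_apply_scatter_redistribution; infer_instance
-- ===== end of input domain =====

-- B replaces A's two sequential passes (clear scatters, then apply bounds-checked placements) by a
-- placement set built once and ONE index-driven pass deciding each of the first five cells per row.
-- Objective: alternative decomposition, same asymptotic cost.

-- ===== PORT A =====
-- 'for reel_idx in range(5): if row[reel_idx] == "S": row[reel_idx] = "L1"'
def pvClearRowA (row : List String) : List String :=
  (PySem.List.pyRange 0 5 1).foldl
    (fun r i => if PySem.List.pyGetD r i "" = "S" then PySem.List.pySetD r i "L1" else r) row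

def apply_scatter_redistribution (rows : List (List String)) (placements : List (Int × Int)) : List (List String) :=
  let new_rows := rows.map (fun row => row)          -- row.copy()
  let new_rows := new_rows.map pvClearRowA           -- remove all current scatters
  placements.foldl (fun nr p =>                      -- place new scatters
    if 0 ≤ p.1 ∧ p.1 < (nr.length : Int) ∧ 0 ≤ p.2 ∧ p.2 < 5 then
      PySem.List.pySetD nr p.1 (PySem.List.pySetD (PySem.List.pyGetD nr p.1 []) p.2 "S")
    else nr) new_rows

-- ===== PORT B =====
-- inner 'for c in range(5)' loop of B
def pvRowB (placed : PySem.Set (Int × Int)) (row_idx : Int) (row : List String) : List String :=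
  (PySem.List.pyRange 0 5 1).foldl
    (fun r c =>
      if (row_idx, c) ∈ placed then PySem.List.pySetD r c "S"
      else if PySem.List.pyGetD r c "" = "S" then PySem.List.pySetD r c "L1" else r) row

def apply_scatter_redistribution_alt (rows : List (List String)) (placements : List (Int × Int)) : List (List String) :=
  let placed : PySem.Set (Int × Int) := PySem.Set.ofList placements
  (PySem.List.enumerate rows 0).foldl
    (fun new_rows ri => new_rows ++ [pvRowB placed ri.1 ri.2]) []

-- ===== PRECONDITION & SPEC =====
-- A raises IndexError (row[reel_idx] for reel_idx in range(5)) on any row shorter than 5; exactly those inputs are excluded.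
def Pre_apply_scatter_redistribution (rows : List (List String)) (placements : List (Int × Int)) : Prop :=
  ∀ row ∈ rows, 5 ≤ row.length
instance (rows : List (List String)) (placements : List (Int × Int)) : Decidable (Pre_apply_scatter_redistribution rows placements) := by unfold Pre_apply_scatter_redistribution; infer_instance

def pvWitness_apply_scatter_redistribution : List (List String) × (List (Int × Int)) :=
  ([["S", "L1", "H1", "S", "L1"], ["L1", "L1", "S", "H1", "H1"]], [(0, 2), (1, 4), (7, 0), (-1, 3)])

def Spec_apply_scatter_redistribution (rows : List (List String)) (placements : List (Int × Int)) (out : List (List String)) : Prop := out = apply_scatter_redistribution_alt rows placements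
instance (rows : List (List String)) (placements : List (Int × Int)) (out : List (List String)) : Decidable (Spec_apply_scatter_redistribution rows placements out) := by unfold Spec_apply_scatter_redistribution; infer_instance

-- ===== CLAIM (what is proved, stated in full; the proofs are below) =====
def Claim_equal_apply_scatter_redistribution : Prop := ∀ (rows : List (List String)) (placements : List (Int × Int)), Dom_apply_scatter_redistribution rows placements → Pre_apply_scatter_redistribution rows placements → Spec_apply_scatter_redistribution rows placements (apply_scatter_redistribution rows placements)

-- ===== LEMMAS AND PROOFS =====

-- the effect of A's placement foldl on a single row, as a per-row foldl
def pvPlaceRow (placements : List (Int × Int)) (i : Int) (row : List String) : List String :=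
  placements.foldl
    (fun r p => if p.1 = i ∧ 0 ≤ p.2 ∧ p.2 < 5 then PySem.List.pySetD r p.2 "S" else r) row

theorem pvPlaceFold_length (ps : List (Int × Int)) (nr : List (List String)) :
    (ps.foldl (fun nr p =>
      if 0 ≤ p.1 ∧ p.1 < (nr.length : Int) ∧ 0 ≤ p.2 ∧ p.2 < 5 then
        PySem.List.pySetD nr p.1 (PySem.List.pySetD (PySem.List.pyGetD nr p.1 []) p.2 "S")
      else nr) nr).length = nr.length := by
  induction ps generalizing nr with
  | nil => rfl
  | cons p ps ih =>
      simp only [List.foldl_cons]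
      split_ifs with h
      · rw [ih]; simp [PySem.List.length_pySetD]
      · exact ih nr

theorem pvPlaceFold_getElem (ps : List (Int × Int)) (nr : List (List String)) (i : Nat)
    (hi : i < nr.length) :
    (ps.foldl (fun nr p =>
      if 0 ≤ p.1 ∧ p.1 < (nr.length : Int) ∧ 0 ≤ p.2 ∧ p.2 < 5 then
        PySem.List.pySetD nr p.1 (PySem.List.pySetD (PySem.List.pyGetD nr p.1 []) p.2 "S")
      else nr) nr)[i]'(by rw [pvPlaceFold_length]; exact hi) = pvPlaceRow ps (i : Int) nr[i] := by
  induction ps generalizing nr with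
  | nil => rfl
  | cons p ps ih =>
      simp only [List.foldl_cons, pvPlaceRow] at *
      split_ifs with h
      · obtain ⟨h1, h2, h3, h4⟩ := h
        have hi' : i < (PySem.List.pySetD nr p.1
            (PySem.List.pySetD (PySem.List.pyGetD nr p.1 []) p.2 "S")).length := by
          rw [PySem.List.length_pySetD]; exact hi
        rw [ih _ hi']
        by_cases hpi : p.1 = (i : Int)
        · rw [if_pos ⟨hpi, h3, h4⟩]
          congr 1
          simp only [PySem.List.pySetD_of_nonneg _ _ h1]
          rw [List.getElem_set, if_pos (by omega : p.1.toNat = i)]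
          congr 1
          rw [hpi, PySem.List.pyGetD_eq_getElem _ _ (Int.natCast_nonneg i) (by exact_mod_cast hi)]
          simp
        · rw [if_neg (fun hc => hpi hc.1)]
          congr 1
          simp only [PySem.List.pySetD_of_nonneg _ _ h1]
          rw [List.getElem_set, if_neg (by omega : ¬ p.1.toNat = i)]
      · rw [ih _ hi]
        rw [if_neg (fun hc => h ⟨by omega, by omega, hc.2.1, hc.2.2⟩)]

-- pvPlaceRow on a row with (at least) five explicit cells
theorem pvPlaceRow_five (ps : List (Int × Int)) (i : Int) (a0 a1 a2 a3 a4 : String) (t : List String) :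
    pvPlaceRow ps i (a0 :: a1 :: a2 :: a3 :: a4 :: t) =
      (if (i, (0:Int)) ∈ ps then "S" else a0) ::
      (if (i, (1:Int)) ∈ ps then "S" else a1) ::
      (if (i, (2:Int)) ∈ ps then "S" else a2) ::
      (if (i, (3:Int)) ∈ ps then "S" else a3) ::
      (if (i, (4:Int)) ∈ ps then "S" else a4) :: t := by
  induction ps generalizing a0 a1 a2 a3 a4 with
  | nil => simp [pvPlaceRow]
  | cons p ps ih =>
      obtain ⟨pa, pb⟩ := p
      simp only [pvPlaceRow, List.foldl_cons] at *
      by_cases h : pa = i ∧ 0 ≤ pb ∧ pb < 5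
      · obtain ⟨rfl, h2, h3⟩ := h
        rw [if_pos ⟨rfl, h2, h3⟩]
        have h5 : pb = 0 ∨ pb = 1 ∨ pb = 2 ∨ pb = 3 ∨ pb = 4 := by omega
        rcases h5 with rfl | rfl | rfl | rfl | rfl
        · rw [show PySem.List.pySetD (a0 :: a1 :: a2 :: a3 :: a4 :: t) (0:Int) "S"
                = "S" :: a1 :: a2 :: a3 :: a4 :: t from by rw [PySem.List.pySetD_of_nonneg _ _ (by norm_num)]; rfl, ih]
          simp [List.mem_cons, Prod.ext_iff]
        · rw [show PySem.List.pySetD (a0 :: a1 :: a2 :: a3 :: a4 :: t) (1:Int) "S"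
                = a0 :: "S" :: a2 :: a3 :: a4 :: t from by rw [PySem.List.pySetD_of_nonneg _ _ (by norm_num)]; rfl, ih]
          simp [List.mem_cons, Prod.ext_iff]
        · rw [show PySem.List.pySetD (a0 :: a1 :: a2 :: a3 :: a4 :: t) (2:Int) "S"
                = a0 :: a1 :: "S" :: a3 :: a4 :: t from by rw [PySem.List.pySetD_of_nonneg _ _ (by norm_num)]; rfl, ih]
          simp [List.mem_cons, Prod.ext_iff]
        · rw [show PySem.List.pySetD (a0 :: a1 :: a2 :: a3 :: a4 :: t) (3:Int) "S"
                = a0 :: a1 :: a2 :: "S" :: a4 :: t from by rw [PySem.List.pySetD_of_nonneg _ _ (by norm_num)]; rfl, ih]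
          simp [List.mem_cons, Prod.ext_iff]
        · rw [show PySem.List.pySetD (a0 :: a1 :: a2 :: a3 :: a4 :: t) (4:Int) "S"
                = a0 :: a1 :: a2 :: a3 :: "S" :: t from by rw [PySem.List.pySetD_of_nonneg _ _ (by norm_num)]; rfl, ih]
          simp [List.mem_cons, Prod.ext_iff]
      · rw [if_neg h, ih]
        have h0 : ∀ (c : Int), 0 ≤ c → c < 5 → (((i, c) = (pa, pb)) ∨ (i, c) ∈ ps ↔ (i, c) ∈ ps) := by
          intro c hc1 hc2
          constructor
          · rintro (he | hm)
            · obtain ⟨rfl, rfl⟩ := Prod.mk.injEq .. ▸ Prod.ext_iff.mp he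
              exact absurd ⟨rfl, hc1, hc2⟩ h
            · exact hm
          · exact Or.inr
        simp only [List.mem_cons]
        rw [if_congr (h0 0 (by norm_num) (by norm_num)) rfl rfl,
            if_congr (h0 1 (by norm_num) (by norm_num)) rfl rfl,
            if_congr (h0 2 (by norm_num) (by norm_num)) rfl rfl,
            if_congr (h0 3 (by norm_num) (by norm_num)) rfl rfl,
            if_congr (h0 4 (by norm_num) (by norm_num)) rfl rfl]

theorem pvRange5 : PySem.List.pyRange 0 5 1 = [0, 1, 2, 3, 4] := by
  rw [PySem.List.pyRange_one_cons (by norm_num), PySem.List.pyRange_one_cons (by norm_num),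
      PySem.List.pyRange_one_cons (by norm_num), PySem.List.pyRange_one_cons (by norm_num),
      PySem.List.pyRange_one_cons (by norm_num), PySem.List.pyRange_one_eq_nil (by norm_num)]
  norm_num

theorem pvClearStep0 (b0 b1 b2 b3 b4 : String) (t : List String) :
    (if PySem.List.pyGetD (b0 :: b1 :: b2 :: b3 :: b4 :: t) (0:Int) "" = "S"
      then PySem.List.pySetD (b0 :: b1 :: b2 :: b3 :: b4 :: t) (0:Int) "L1" else (b0 :: b1 :: b2 :: b3 :: b4 :: t)) =
      (if b0 = "S" then "L1" else b0) :: b1 :: b2 :: b3 :: b4 :: t := by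
  have hg : PySem.List.pyGetD (b0 :: b1 :: b2 :: b3 :: b4 :: t) (0:Int) "" = b0 := by
    rw [PySem.List.pyGetD_eq_getElem _ _ (by norm_num) (by simp; omega)]; rfl
  rw [hg]
  by_cases h : b0 = "S"
  · rw [if_pos h, if_pos h, PySem.List.pySetD_of_nonneg _ _ (by norm_num)]; rfl
  · rw [if_neg h, if_neg h]

theorem pvClearStep1 (b0 b1 b2 b3 b4 : String) (t : List String) :
    (if PySem.List.pyGetD (b0 :: b1 :: b2 :: b3 :: b4 :: t) (1:Int) "" = "S"
      then PySem.List.pySetD (b0 :: b1 :: b2 :: b3 :: b4 :: t) (1:Int) "L1" else (b0 :: b1 :: b2 :: b3 :: b4 :: t)) =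
      b0 :: (if b1 = "S" then "L1" else b1) :: b2 :: b3 :: b4 :: t := by
  have hg : PySem.List.pyGetD (b0 :: b1 :: b2 :: b3 :: b4 :: t) (1:Int) "" = b1 := by
    rw [PySem.List.pyGetD_eq_getElem _ _ (by norm_num) (by simp; omega)]; rfl
  rw [hg]
  by_cases h : b1 = "S"
  · rw [if_pos h, if_pos h, PySem.List.pySetD_of_nonneg _ _ (by norm_num)]; rfl
  · rw [if_neg h, if_neg h]

theorem pvClearStep2 (b0 b1 b2 b3 b4 : String) (t : List String) :
    (if PySem.List.pyGetD (b0 :: b1 :: b2 :: b3 :: b4 :: t) (2:Int) "" = "S"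
      then PySem.List.pySetD (b0 :: b1 :: b2 :: b3 :: b4 :: t) (2:Int) "L1" else (b0 :: b1 :: b2 :: b3 :: b4 :: t)) =
      b0 :: b1 :: (if b2 = "S" then "L1" else b2) :: b3 :: b4 :: t := by
  have hg : PySem.List.pyGetD (b0 :: b1 :: b2 :: b3 :: b4 :: t) (2:Int) "" = b2 := by
    rw [PySem.List.pyGetD_eq_getElem _ _ (by norm_num) (by simp; omega)]; rfl
  rw [hg]
  by_cases h : b2 = "S"
  · rw [if_pos h, if_pos h, PySem.List.pySetD_of_nonneg _ _ (by norm_num)]; rfl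
  · rw [if_neg h, if_neg h]

theorem pvClearStep3 (b0 b1 b2 b3 b4 : String) (t : List String) :
    (if PySem.List.pyGetD (b0 :: b1 :: b2 :: b3 :: b4 :: t) (3:Int) "" = "S"
      then PySem.List.pySetD (b0 :: b1 :: b2 :: b3 :: b4 :: t) (3:Int) "L1" else (b0 :: b1 :: b2 :: b3 :: b4 :: t)) =
      b0 :: b1 :: b2 :: (if b3 = "S" then "L1" else b3) :: b4 :: t := by
  have hg : PySem.List.pyGetD (b0 :: b1 :: b2 :: b3 :: b4 :: t) (3:Int) "" = b3 := by
    rw [PySem.List.pyGetD_eq_getElem _ _ (by norm_num) (by simp; omega)]; rfl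
  rw [hg]
  by_cases h : b3 = "S"
  · rw [if_pos h, if_pos h, PySem.List.pySetD_of_nonneg _ _ (by norm_num)]; rfl
  · rw [if_neg h, if_neg h]

theorem pvClearStep4 (b0 b1 b2 b3 b4 : String) (t : List String) :
    (if PySem.List.pyGetD (b0 :: b1 :: b2 :: b3 :: b4 :: t) (4:Int) "" = "S"
      then PySem.List.pySetD (b0 :: b1 :: b2 :: b3 :: b4 :: t) (4:Int) "L1" else (b0 :: b1 :: b2 :: b3 :: b4 :: t)) =
      b0 :: b1 :: b2 :: b3 :: (if b4 = "S" then "L1" else b4) :: t := by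
  have hg : PySem.List.pyGetD (b0 :: b1 :: b2 :: b3 :: b4 :: t) (4:Int) "" = b4 := by
    rw [PySem.List.pyGetD_eq_getElem _ _ (by norm_num) (by simp; omega)]; rfl
  rw [hg]
  by_cases h : b4 = "S"
  · rw [if_pos h, if_pos h, PySem.List.pySetD_of_nonneg _ _ (by norm_num)]; rfl
  · rw [if_neg h, if_neg h]

theorem pvClearRowA_five (a0 a1 a2 a3 a4 : String) (t : List String) :
    pvClearRowA (a0 :: a1 :: a2 :: a3 :: a4 :: t) =
      (if a0 = "S" then "L1" else a0) :: (if a1 = "S" then "L1" else a1) ::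
      (if a2 = "S" then "L1" else a2) :: (if a3 = "S" then "L1" else a3) ::
      (if a4 = "S" then "L1" else a4) :: t := by
  simp only [pvClearRowA, pvRange5, List.foldl_cons, List.foldl_nil]
  rw [pvClearStep0, pvClearStep1, pvClearStep2, pvClearStep3, pvClearStep4]

theorem pvBStep0 (placed : PySem.Set (Int × Int)) (i : Int) (b0 b1 b2 b3 b4 : String) (t : List String) :
    (if (i, (0:Int)) ∈ placed then PySem.List.pySetD (b0 :: b1 :: b2 :: b3 :: b4 :: t) (0:Int) "S"
      else if PySem.List.pyGetD (b0 :: b1 :: b2 :: b3 :: b4 :: t) (0:Int) "" = "S"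
        then PySem.List.pySetD (b0 :: b1 :: b2 :: b3 :: b4 :: t) (0:Int) "L1" else (b0 :: b1 :: b2 :: b3 :: b4 :: t)) =
      (if ((i, (0:Int)) ∈ placed) then "S" else if b0 = "S" then "L1" else b0) :: b1 :: b2 :: b3 :: b4 :: t := by
  have hg : PySem.List.pyGetD (b0 :: b1 :: b2 :: b3 :: b4 :: t) (0:Int) "" = b0 := by
    rw [PySem.List.pyGetD_eq_getElem _ _ (by norm_num) (by simp; omega)]; rfl
  by_cases hm : (i, (0:Int)) ∈ placed
  · rw [if_pos hm, if_pos hm, PySem.List.pySetD_of_nonneg _ _ (by norm_num)]; rfl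
  · rw [if_neg hm, if_neg hm, hg]
    by_cases h : b0 = "S"
    · rw [if_pos h, if_pos h, PySem.List.pySetD_of_nonneg _ _ (by norm_num)]; rfl
    · rw [if_neg h, if_neg h]

theorem pvBStep1 (placed : PySem.Set (Int × Int)) (i : Int) (b0 b1 b2 b3 b4 : String) (t : List String) :
    (if (i, (1:Int)) ∈ placed then PySem.List.pySetD (b0 :: b1 :: b2 :: b3 :: b4 :: t) (1:Int) "S"
      else if PySem.List.pyGetD (b0 :: b1 :: b2 :: b3 :: b4 :: t) (1:Int) "" = "S"
        then PySem.List.pySetD (b0 :: b1 :: b2 :: b3 :: b4 :: t) (1:Int) "L1" else (b0 :: b1 :: b2 :: b3 :: b4 :: t)) =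
      b0 :: (if ((i, (1:Int)) ∈ placed) then "S" else if b1 = "S" then "L1" else b1) :: b2 :: b3 :: b4 :: t := by
  have hg : PySem.List.pyGetD (b0 :: b1 :: b2 :: b3 :: b4 :: t) (1:Int) "" = b1 := by
    rw [PySem.List.pyGetD_eq_getElem _ _ (by norm_num) (by simp; omega)]; rfl
  by_cases hm : (i, (1:Int)) ∈ placed
  · rw [if_pos hm, if_pos hm, PySem.List.pySetD_of_nonneg _ _ (by norm_num)]; rfl
  · rw [if_neg hm, if_neg hm, hg]
    by_cases h : b1 = "S"
    · rw [if_pos h, if_pos h, PySem.List.pySetD_of_nonneg _ _ (by norm_num)]; rfl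
    · rw [if_neg h, if_neg h]

theorem pvBStep2 (placed : PySem.Set (Int × Int)) (i : Int) (b0 b1 b2 b3 b4 : String) (t : List String) :
    (if (i, (2:Int)) ∈ placed then PySem.List.pySetD (b0 :: b1 :: b2 :: b3 :: b4 :: t) (2:Int) "S"
      else if PySem.List.pyGetD (b0 :: b1 :: b2 :: b3 :: b4 :: t) (2:Int) "" = "S"
        then PySem.List.pySetD (b0 :: b1 :: b2 :: b3 :: b4 :: t) (2:Int) "L1" else (b0 :: b1 :: b2 :: b3 :: b4 :: t)) =
      b0 :: b1 :: (if ((i, (2:Int)) ∈ placed) then "S" else if b2 = "S" then "L1" else b2) :: b3 :: b4 :: t := by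
  have hg : PySem.List.pyGetD (b0 :: b1 :: b2 :: b3 :: b4 :: t) (2:Int) "" = b2 := by
    rw [PySem.List.pyGetD_eq_getElem _ _ (by norm_num) (by simp; omega)]; rfl
  by_cases hm : (i, (2:Int)) ∈ placed
  · rw [if_pos hm, if_pos hm, PySem.List.pySetD_of_nonneg _ _ (by norm_num)]; rfl
  · rw [if_neg hm, if_neg hm, hg]
    by_cases h : b2 = "S"
    · rw [if_pos h, if_pos h, PySem.List.pySetD_of_nonneg _ _ (by norm_num)]; rfl
    · rw [if_neg h, if_neg h]

theorem pvBStep3 (placed : PySem.Set (Int × Int)) (i : Int) (b0 b1 b2 b3 b4 : String) (t : List String) :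
    (if (i, (3:Int)) ∈ placed then PySem.List.pySetD (b0 :: b1 :: b2 :: b3 :: b4 :: t) (3:Int) "S"
      else if PySem.List.pyGetD (b0 :: b1 :: b2 :: b3 :: b4 :: t) (3:Int) "" = "S"
        then PySem.List.pySetD (b0 :: b1 :: b2 :: b3 :: b4 :: t) (3:Int) "L1" else (b0 :: b1 :: b2 :: b3 :: b4 :: t)) =
      b0 :: b1 :: b2 :: (if ((i, (3:Int)) ∈ placed) then "S" else if b3 = "S" then "L1" else b3) :: b4 :: t := by
  have hg : PySem.List.pyGetD (b0 :: b1 :: b2 :: b3 :: b4 :: t) (3:Int) "" = b3 := by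
    rw [PySem.List.pyGetD_eq_getElem _ _ (by norm_num) (by simp; omega)]; rfl
  by_cases hm : (i, (3:Int)) ∈ placed
  · rw [if_pos hm, if_pos hm, PySem.List.pySetD_of_nonneg _ _ (by norm_num)]; rfl
  · rw [if_neg hm, if_neg hm, hg]
    by_cases h : b3 = "S"
    · rw [if_pos h, if_pos h, PySem.List.pySetD_of_nonneg _ _ (by norm_num)]; rfl
    · rw [if_neg h, if_neg h]

theorem pvBStep4 (placed : PySem.Set (Int × Int)) (i : Int) (b0 b1 b2 b3 b4 : String) (t : List String) :
    (if (i, (4:Int)) ∈ placed then PySem.List.pySetD (b0 :: b1 :: b2 :: b3 :: b4 :: t) (4:Int) "S"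
      else if PySem.List.pyGetD (b0 :: b1 :: b2 :: b3 :: b4 :: t) (4:Int) "" = "S"
        then PySem.List.pySetD (b0 :: b1 :: b2 :: b3 :: b4 :: t) (4:Int) "L1" else (b0 :: b1 :: b2 :: b3 :: b4 :: t)) =
      b0 :: b1 :: b2 :: b3 :: (if ((i, (4:Int)) ∈ placed) then "S" else if b4 = "S" then "L1" else b4) :: t := by
  have hg : PySem.List.pyGetD (b0 :: b1 :: b2 :: b3 :: b4 :: t) (4:Int) "" = b4 := by
    rw [PySem.List.pyGetD_eq_getElem _ _ (by norm_num) (by simp; omega)]; rfl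
  by_cases hm : (i, (4:Int)) ∈ placed
  · rw [if_pos hm, if_pos hm, PySem.List.pySetD_of_nonneg _ _ (by norm_num)]; rfl
  · rw [if_neg hm, if_neg hm, hg]
    by_cases h : b4 = "S"
    · rw [if_pos h, if_pos h, PySem.List.pySetD_of_nonneg _ _ (by norm_num)]; rfl
    · rw [if_neg h, if_neg h]

theorem pvRowB_five (placed : PySem.Set (Int × Int)) (i : Int) (a0 a1 a2 a3 a4 : String)
    (t : List String) :
    pvRowB placed i (a0 :: a1 :: a2 :: a3 :: a4 :: t) =
      (if (i, (0:Int)) ∈ placed then "S" else if a0 = "S" then "L1" else a0) ::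
      (if (i, (1:Int)) ∈ placed then "S" else if a1 = "S" then "L1" else a1) ::
      (if (i, (2:Int)) ∈ placed then "S" else if a2 = "S" then "L1" else a2) ::
      (if (i, (3:Int)) ∈ placed then "S" else if a3 = "S" then "L1" else a3) ::
      (if (i, (4:Int)) ∈ placed then "S" else if a4 = "S" then "L1" else a4) :: t := by
  simp only [pvRowB, pvRange5, List.foldl_cons, List.foldl_nil]
  rw [pvBStep0, pvBStep1, pvBStep2, pvBStep3, pvBStep4]

-- the two per-row results coincide
theorem pvRow_eq (placements : List (Int × Int)) (i : Nat) (row : List String)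
    (hrow : 5 ≤ row.length) :
    pvPlaceRow placements (i : Int) (pvClearRowA row) =
      pvRowB (PySem.Set.ofList placements) (i : Int) row := by
  match row, hrow with
  | a0 :: a1 :: a2 :: a3 :: a4 :: t, _ =>
    rw [pvClearRowA_five, pvPlaceRow_five, pvRowB_five]
    simp only [PySem.Set.mem_ofList]

-- ===== VERDICT (by name: the statement is the Claim_ definition above) =====
theorem apply_scatter_redistribution_spec : Claim_equal_apply_scatter_redistribution := by
  intro rows placements _ hpre
  unfold Spec_apply_scatter_redistribution
  unfold apply_scatter_redistribution apply_scatter_redistribution_alt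
  simp only [List.map_id']
  rw [PySem.List.foldl_append_singleton_eq_map, List.nil_append]
  apply List.ext_getElem
  · rw [pvPlaceFold_length]
    simp [PySem.List.length_enumerate]
  · intro i h1 h2
    have hi : i < rows.length := by
      rw [pvPlaceFold_length] at h1; simpa using h1
    rw [pvPlaceFold_getElem _ _ i (by simpa using hi)]
    have he := PySem.List.getElem_enumerate rows 0 i
      (by rw [PySem.List.length_enumerate]; exact hi)
    simp only [List.getElem_map, he, zero_add]
    exact pvRow_eq placements i rows[i] (hpre _ (List.getElem_mem hi))
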